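-- pv_equiv track=rewrite | github.com/samirpatil2000/Programs101 | LeetCode/StackAndQueue/85. Maximal Rectangle__.py | prev_next_min_element
-- ===== SOURCE A (Python) =====
-- from typing import List
--
-- def prev_next_min_element(arr:List[int])->List[int]:
--     n=len(arr)
--     next_min=[n]*n
--     st=[]
--     for i in range(n-1,-1,-1):
--         while st and arr[i]<=arr[st[-1]]:
--             st.pop()
--         if st:
--             next_min[i]=st[-1]
--         st.append(i)
--     st.clear()
--
--     prev_min=[-1]*n
--     for i in range(n):
--         while st and arr[i]<=arr[st[-1]]:
--             st.pop()
--         if st: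
--             prev_min[i]=st[-1]
--         st.append(i)
--     return zip(prev_min,next_min)
-- ===== SOURCE B (Python) =====
-- from typing import List
--
-- def prev_next_min_element(arr: List[int]) -> List[int]:
--     n = len(arr)
--     prev_min = []
--     next_min = []
--     for i in range(n):
--         x = arr[i]
--         p = -1
--         for j in range(i - 1, -1, -1):
--             if arr[j] < x:
--                 p = j
--                 break
--         prev_min.append(p)
--         q = n
--         for j in range(i + 1, n):
--             if arr[j] < x:
--                 q = j
--                 break
--         next_min.append(q)
--     return zip(prev_min, next_min)
-- ===== Notes on version B (the rewrite author's own statement) =====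
-- stated objective: simpler
-- what changed: Replaces A's two monotonic-stack passes (pop on <=, record stack top) by direct nested scans: for each i, scan left for the last j<i with arr[j]<arr[i] (else -1) and right for the first j>i with arr[j]<arr[i] (else n), then zip.
import Mathlib
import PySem

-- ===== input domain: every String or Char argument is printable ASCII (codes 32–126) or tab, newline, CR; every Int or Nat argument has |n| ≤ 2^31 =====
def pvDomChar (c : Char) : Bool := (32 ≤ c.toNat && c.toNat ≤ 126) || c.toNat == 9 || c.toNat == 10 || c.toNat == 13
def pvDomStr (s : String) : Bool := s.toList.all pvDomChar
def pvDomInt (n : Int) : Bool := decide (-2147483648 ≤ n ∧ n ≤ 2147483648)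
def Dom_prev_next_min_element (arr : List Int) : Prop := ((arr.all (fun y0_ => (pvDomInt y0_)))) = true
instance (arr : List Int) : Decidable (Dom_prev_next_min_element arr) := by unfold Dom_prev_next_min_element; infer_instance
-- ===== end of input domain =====

-- B replaces A's two monotonic-stack passes by direct nested scans (for each i, scan left / right
-- to the first strictly smaller element); objective: simpler, same results, no speed claim.

-- ===== PORT A =====
-- arr[j] for an index known to be in range (loop indices and stored stack indices); exact there.
def pvAt (arr : List Int) (j : Nat) : Int := arr.getD j 0

-- the 'while st and arr[i] <= arr[st[-1]]: st.pop()' loop (stack head = Python st[-1])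
def pvPop (arr : List Int) (x : Int) : List Nat → List Nat
  | [] => []
  | t :: r => if x ≤ pvAt arr t then pvPop arr x r else t :: r

-- one iteration of either of A's for-loops: pop, record st[-1] if nonempty, push i
def pvStep (arr : List Int) (s : List Int × List Nat) (i : Nat) : List Int × List Nat :=
  match pvPop arr (pvAt arr i) s.2 with
  | [] => (s.1, i :: [])
  | t :: r => (s.1.set i ((t : Nat) : Int), i :: t :: r)

def prev_next_min_element (arr : List Int) : List (Int × Int) :=
  (((List.range arr.length).foldl (pvStep arr) (List.replicate arr.length (-1 : Int), [])).1).zip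
    (((List.range arr.length).reverse.foldl (pvStep arr)
      (List.replicate arr.length ((arr.length : Nat) : Int), [])).1)

-- ===== PORT B =====
-- 'for j in range(i-1,-1,-1): if arr[j] < x: p = j; break' (else -1)
def pvPrevScan (arr : List Int) (x : Int) : Nat → Int
  | 0 => -1
  | j + 1 => if pvAt arr j < x then ((j : Nat) : Int) else pvPrevScan arr x j

-- 'for j in range(i+1,n): if arr[j] < x: q = j; break' (else n)
def pvNextScan (arr : List Int) (x : Int) (n : Nat) (j : Nat) : Int :=
  if j < n then (if pvAt arr j < x then (j : Int) else pvNextScan arr x n (j + 1)) else (n : Int)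
termination_by n - j

def prev_next_min_element_alt (arr : List Int) : List (Int × Int) :=
  ((List.range arr.length).map (fun i => pvPrevScan arr (pvAt arr i) i)).zip
    ((List.range arr.length).map (fun i => pvNextScan arr (pvAt arr i) arr.length (i + 1)))

-- ===== PRECONDITION & SPEC =====
def Spec_prev_next_min_element (arr : List Int) (out : List (Int × Int)) : Prop := out = prev_next_min_element_alt arr
instance (arr : List Int) (out : List (Int × Int)) : Decidable (Spec_prev_next_min_element arr out) := by unfold Spec_prev_next_min_element; infer_instance

-- ===== CLAIM (what is proved, stated in full; the proofs are below) =====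
def Claim_equal_prev_next_min_element : Prop := ∀ (arr : List Int), Dom_prev_next_min_element arr → Spec_prev_next_min_element arr (prev_next_min_element arr)

-- ===== LEMMAS AND PROOFS =====

-- stack invariant for the prev_min pass, after processing indices 0..i-1
def StInvP (arr : List Int) (i : Nat) (st : List Nat) : Prop :=
  st.Pairwise (fun a b => b < a) ∧
  (∀ j ∈ st, j < i) ∧
  (∀ j ∈ st, ∀ k, j < k → k < i → pvAt arr j < pvAt arr k) ∧
  (∀ j, j < i → (∀ k, j < k → k < i → pvAt arr j < pvAt arr k) → j ∈ st)

-- stack invariant for the next_min pass, after processing indices (arr.length-1)..i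
def StInvN (arr : List Int) (i : Nat) (st : List Nat) : Prop :=
  st.Pairwise (fun a b => a < b) ∧
  (∀ m ∈ st, i ≤ m ∧ m < arr.length) ∧
  (∀ m ∈ st, ∀ k, i ≤ k → k < m → pvAt arr m < pvAt arr k) ∧
  (∀ m, i ≤ m → m < arr.length → (∀ k, i ≤ k → k < m → pvAt arr m < pvAt arr k) → m ∈ st)

theorem pvPop_subset (arr : List Int) (x : Int) (st : List Nat) :
    ∀ j ∈ pvPop arr x st, j ∈ st := by
  induction st with
  | nil => simp [pvPop]
  | cons t r ih =>
    intro j hj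
    by_cases h : x ≤ pvAt arr t
    · simp [pvPop, h] at hj
      exact List.mem_cons_of_mem _ (ih j hj)
    · simpa [pvPop, h] using hj

theorem pvPop_pairwise (arr : List Int) (x : Int) (st : List Nat) (R : Nat → Nat → Prop)
    (h : st.Pairwise R) : (pvPop arr x st).Pairwise R := by
  induction st with
  | nil => simp [pvPop]
  | cons t r ih =>
    by_cases hc : x ≤ pvAt arr t
    · simp only [pvPop, hc, if_pos]
      exact ih (List.Pairwise.of_cons h)
    · simpa [pvPop, hc] using h

theorem pvPop_head (arr : List Int) (x : Int) (st : List Nat) (t : Nat) (r : List Nat)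
    (h : pvPop arr x st = t :: r) : pvAt arr t < x := by
  induction st with
  | nil => simp [pvPop] at h
  | cons a b ih =>
    by_cases hc : x ≤ pvAt arr a
    · exact ih (by simpa [pvPop, hc] using h)
    · have h' : a :: b = t :: r := by simpa [pvPop, hc] using h
      cases h'
      omega

theorem mem_pvPop (arr : List Int) (x : Int) (st : List Nat) (j : Nat)
    (hj : j ∈ st) (hv : pvAt arr j < x) : j ∈ pvPop arr x st := by
  induction st with
  | nil => simp at hj
  | cons t r ih =>
    by_cases hc : x ≤ pvAt arr t
    · have hjr : j ∈ r := by
        rcases List.mem_cons.1 hj with h | h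
        · subst h; omega
        · exact h
      simpa [pvPop, hc] using ih hjr
    · simpa [pvPop, hc] using hj

theorem popP_bound (arr : List Int) (i : Nat) (st : List Nat) (h : StInvP arr i st)
    (k : Nat) (hk : k < i) (hv : pvAt arr k < pvAt arr i) :
    ∃ m ∈ pvPop arr (pvAt arr i) st, k ≤ m := by
  by_cases hall : ∀ k', k < k' → k' < i → ¬ pvAt arr k' < pvAt arr i
  · have hmem : k ∈ st :=
      h.2.2.2 k hk (fun k2 h1 h2 => lt_of_lt_of_le hv (not_lt.1 (hall k2 h1 h2)))
    exact ⟨k, mem_pvPop arr _ st k hmem hv, le_rfl⟩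
  · push Not at hall
    obtain ⟨k', h1, h2, h3⟩ := hall
    obtain ⟨m, hm1, hm2⟩ := popP_bound arr i st h k' h2 h3
    exact ⟨m, hm1, by omega⟩
termination_by i - k

theorem popN_bound (arr : List Int) (i : Nat) (st : List Nat) (h : StInvN arr (i + 1) st)
    (k : Nat) (hik : i < k) (hkn : k < arr.length) (hv : pvAt arr k < pvAt arr i) :
    ∃ m ∈ pvPop arr (pvAt arr i) st, m ≤ k := by
  by_cases hall : ∀ k', i < k' → k' < k → ¬ pvAt arr k' < pvAt arr i
  · have hmem : k ∈ st :=
      h.2.2.2 k (by omega) hkn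
        (fun k2 h1 h2 => lt_of_lt_of_le hv (not_lt.1 (hall k2 (by omega) h2)))
    exact ⟨k, mem_pvPop arr _ st k hmem hv, le_rfl⟩
  · push Not at hall
    obtain ⟨k', h1, h2, h3⟩ := hall
    obtain ⟨m, hm1, hm2⟩ := popN_bound arr i st h k' h1 (by omega) h3
    exact ⟨m, hm1, by omega⟩
termination_by k

theorem pvPrevScan_none (arr : List Int) (x : Int) (i : Nat)
    (h : ∀ j, j < i → ¬ pvAt arr j < x) : pvPrevScan arr x i = -1 := by
  induction i with
  | zero => rfl
  | succ m ih =>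
    have hm := h m (by omega)
    simp only [pvPrevScan, if_neg hm]
    exact ih (fun j hj => h j (by omega))

theorem pvPrevScan_found (arr : List Int) (x : Int) (i t : Nat)
    (ht : t < i) (hv : pvAt arr t < x) (hmax : ∀ k, t < k → k < i → ¬ pvAt arr k < x) :
    pvPrevScan arr x i = (t : Int) := by
  induction i with
  | zero => omega
  | succ m ih =>
    by_cases hm : t = m
    · subst hm; simp [pvPrevScan, hv]
    · have h1 : ¬ pvAt arr m < x := hmax m (by omega) (by omega)
      simp only [pvPrevScan, if_neg h1]
      exact ih (by omega) (fun k hk1 hk2 => hmax k hk1 (by omega))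

theorem pvNextScan_none (arr : List Int) (x : Int) (n j : Nat)
    (h : ∀ k, j ≤ k → k < n → ¬ pvAt arr k < x) : pvNextScan arr x n j = (n : Int) := by
  by_cases hj : j < n
  · rw [pvNextScan]
    simp only [hj, if_pos, if_neg (h j le_rfl hj)]
    exact pvNextScan_none arr x n (j + 1) (fun k hk1 hk2 => h k (by omega) hk2)
  · rw [pvNextScan]
    simp [hj]
termination_by n - j

theorem pvNextScan_found (arr : List Int) (x : Int) (n j t : Nat)
    (hj : j ≤ t) (ht : t < n) (hv : pvAt arr t < x)
    (hmin : ∀ k, j ≤ k → k < t → ¬ pvAt arr k < x) :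
    pvNextScan arr x n j = (t : Int) := by
  have hjn : j < n := by omega
  by_cases hjt : j = t
  · subst hjt
    rw [pvNextScan]
    simp [hjn, hv]
  · rw [pvNextScan]
    simp only [hjn, if_pos, if_neg (hmin j le_rfl (by omega))]
    exact pvNextScan_found arr x n (j + 1) t (by omega) ht hv
      (fun k hk1 hk2 => hmin k (by omega) hk2)
termination_by n - j

theorem map_range_set {α : Type} (n i : Nat) (f : Nat → α) (v : α) (_hi : i < n) :
    ((List.range n).map f).set i v = (List.range n).map (fun k => if k = i then v else f k) := by
  apply List.ext_getElem
  · simp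
  · intro k h1 h2
    simp only [List.getElem_set, List.getElem_map, List.getElem_range]
    simp only [List.length_set, List.length_map, List.length_range] at h1
    split_ifs with hki hik hik
    · simp
    · omega
    · omega
    · rfl

-- the prev_min pass, after processing indices 0..i-1
theorem prevFold (arr : List Int) : ∀ i, i ≤ arr.length →
    ∃ st, ((List.range i).foldl (pvStep arr) (List.replicate arr.length (-1 : Int), [])) =
      ((List.range arr.length).map
        (fun k => if k < i then pvPrevScan arr (pvAt arr k) k else (-1 : Int)), st) ∧
      StInvP arr i st := by
  intro i
  induction i with
  | zero =>
    intro _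
    refine ⟨[], ?_, ?_⟩
    · simp only [List.range_zero, List.foldl_nil]
      congr 1
      have : ∀ k, (if k < 0 then pvPrevScan arr (pvAt arr k) k else (-1 : Int)) = -1 := by
        intro k; simp
      simp only [this]
      simp [List.map_const']
    · exact ⟨List.Pairwise.nil, by simp, by simp, fun j hj _ => by omega⟩
  | succ i ih =>
    intro hle
    have hi : i < arr.length := by omega
    obtain ⟨st, hfold, hinv⟩ := ih (by omega)
    rw [List.range_succ, List.foldl_append, hfold, List.foldl_cons, List.foldl_nil]
    unfold pvStep
    rcases hpp : pvPop arr (pvAt arr i) st with _ | ⟨t, r⟩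
    · -- stack emptied: no j < i with arr[j] < arr[i]
      have hnone : ∀ j, j < i → ¬ pvAt arr j < pvAt arr i := by
        intro j hj hv
        obtain ⟨m, hm, _⟩ := popP_bound arr i st hinv j hj hv
        rw [hpp] at hm; simp at hm
      refine ⟨[i], ?_, ?_⟩
      · simp only [Prod.mk.injEq]
        refine ⟨List.map_congr_left (fun k hk => ?_), trivial⟩
        by_cases hki : k < i
        · simp [hki, (by omega : k < i + 1)]
        · by_cases hkei : k = i
          · rw [hkei]
            simp [pvPrevScan_none arr (pvAt arr i) i hnone]
          · simp only [if_neg hki, if_neg (by omega : ¬ k < i + 1)]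
      · refine ⟨List.pairwise_singleton .., by simp, ?_, ?_⟩
        · intro j hj k h1 h2
          simp at hj; omega
        · intro j hj hprem
          rcases Nat.lt_succ_iff_lt_or_eq.1 hj with hj' | hj'
          · exact absurd (hprem i hj' (by omega)) (by simp [hnone j hj'])
          · simp [hj']
    · -- new stack top t = nearest strictly smaller index to the left of i
      have htst : t ∈ st := pvPop_subset arr _ st t (by rw [hpp]; exact List.mem_cons_self ..)
      have hti : t < i := hinv.2.1 t htst
      have htv : pvAt arr t < pvAt arr i := pvPop_head arr _ st t r hpp
      have hpw : (t :: r).Pairwise (fun a b => b < a) := by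
        rw [← hpp]; exact pvPop_pairwise arr _ st _ hinv.1
      have hmax : ∀ k, t < k → k < i → ¬ pvAt arr k < pvAt arr i := by
        intro k h1 h2 hv
        obtain ⟨m, hm, hkm⟩ := popP_bound arr i st hinv k h2 hv
        rw [hpp] at hm
        rcases List.mem_cons.1 hm with hm' | hm'
        · omega
        · have : m < t := (List.pairwise_cons.1 hpw).1 m hm'
          omega
      have hscan : pvPrevScan arr (pvAt arr i) i = (t : Int) :=
        pvPrevScan_found arr _ i t hti htv hmax
      refine ⟨i :: t :: r, ?_, ?_⟩
      · simp only [Prod.mk.injEq]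
        constructor
        · rw [map_range_set arr.length i _ _ hi]
          refine List.map_congr_left (fun k hk => ?_)
          by_cases hkei : k = i
          · rw [hkei]; simp [hscan]
          · by_cases hki : k < i
            · simp [hkei, hki, (by omega : k < i + 1)]
            · simp only [if_neg hkei, if_neg hki, if_neg (by omega : ¬ k < i + 1)]
        · trivial
      · refine ⟨?_, ?_, ?_, ?_⟩
        · refine List.pairwise_cons.2 ⟨fun j hj => ?_, hpw⟩
          have : j ∈ st := pvPop_subset arr _ st j (by rw [hpp]; exact hj)
          exact hinv.2.1 j this
        · intro j hj
          rcases List.mem_cons.1 hj with hj' | hj'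
          · omega
          · have : j ∈ st := pvPop_subset arr _ st j (by rw [hpp]; exact hj')
            have := hinv.2.1 j this; omega
        · intro j hj k h1 h2
          rcases List.mem_cons.1 hj with hj' | hj'
          · omega
          · have hjst : j ∈ st := pvPop_subset arr _ st j (by rw [hpp]; exact hj')
            by_cases hki : k < i
            · exact hinv.2.2.1 j hjst k h1 hki
            · have hkeq : k = i := by omega
              subst hkeq
              rcases List.mem_cons.1 hj' with hjt | hjr
              · subst hjt; exact htv
              · have hjt : j < t := (List.pairwise_cons.1 hpw).1 j hjr
                exact lt_trans (hinv.2.2.1 j hjst t hjt hti) htv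
        · intro j hj hprem
          rcases Nat.lt_succ_iff_lt_or_eq.1 hj with hj' | hj'
          · have hvj : pvAt arr j < pvAt arr i := hprem i hj' (by omega)
            have hjst : j ∈ st :=
              hinv.2.2.2 j hj' (fun k h1 h2 => hprem k h1 (by omega))
            have : j ∈ pvPop arr (pvAt arr i) st := mem_pvPop arr _ st j hjst hvj
            rw [hpp] at this
            exact List.mem_cons_of_mem _ this
          · simp [hj']

-- the next_min pass, after processing indices (arr.length-1)..i
theorem nextFold (arr : List Int) : ∀ d i, i + d = arr.length →
    ∃ st, (((List.range' i d).reverse).foldl (pvStep arr)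
        (List.replicate arr.length ((arr.length : Nat) : Int), [])) =
      ((List.range arr.length).map
        (fun k => if i ≤ k then pvNextScan arr (pvAt arr k) arr.length (k + 1)
                  else ((arr.length : Nat) : Int)), st) ∧
      StInvN arr i st := by
  intro d
  induction d with
  | zero =>
    intro i hi
    have hin : i = arr.length := by omega
    refine ⟨[], ?_, ?_⟩
    · simp only [List.range', List.reverse_nil, List.foldl_nil]
      congr 1
      have : ∀ k ∈ List.range arr.length,
          (if i ≤ k then pvNextScan arr (pvAt arr k) arr.length (k + 1)
           else ((arr.length : Nat) : Int)) = ((arr.length : Nat) : Int) := by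
        intro k hk
        have : k < arr.length := List.mem_range.1 hk
        rw [if_neg (by omega)]
      rw [List.map_congr_left this]
      simp [List.map_const']
    · exact ⟨List.Pairwise.nil, by simp, by simp, fun m h1 h2 _ => by omega⟩
  | succ d ih =>
    intro i hi
    have hin : i < arr.length := by omega
    obtain ⟨st, hfold, hinv⟩ := ih (i + 1) (by omega)
    have hcons : List.range' i (d + 1) = i :: List.range' (i + 1) d := rfl
    rw [hcons, List.reverse_cons, List.foldl_append, hfold, List.foldl_cons, List.foldl_nil]
    unfold pvStep
    rcases hpp : pvPop arr (pvAt arr i) st with _ | ⟨t, r⟩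
    · have hnone : ∀ k, i + 1 ≤ k → k < arr.length → ¬ pvAt arr k < pvAt arr i := by
        intro k h1 h2 hv
        obtain ⟨m, hm, _⟩ := popN_bound arr i st hinv k (by omega) h2 hv
        rw [hpp] at hm; simp at hm
      refine ⟨[i], ?_, ?_⟩
      · simp only [Prod.mk.injEq]
        refine ⟨List.map_congr_left (fun k hk => ?_), trivial⟩
        by_cases hki : i + 1 ≤ k
        · rw [if_pos (by omega), if_pos (by omega)]
        · by_cases hkei : k = i
          · rw [hkei]
            rw [if_neg (by omega), if_pos le_rfl,
              pvNextScan_none arr (pvAt arr i) arr.length (i + 1) hnone]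
          · rw [if_neg (by omega), if_neg (by omega)]
      · refine ⟨List.pairwise_singleton .., by simp [hin], ?_, ?_⟩
        · intro m hm k h1 h2
          simp at hm; omega
        · intro m h1 h2 hprem
          rcases Nat.eq_or_lt_of_le h1 with h1' | h1'
          · simp [h1'.symm]
          · have hvm : pvAt arr m < pvAt arr i := hprem i le_rfl h1'
            exact absurd hvm (hnone m h1' h2)
    · have htst : t ∈ st := pvPop_subset arr _ st t (by rw [hpp]; exact List.mem_cons_self ..)
      have hti : i + 1 ≤ t := (hinv.2.1 t htst).1
      have htn : t < arr.length := (hinv.2.1 t htst).2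
      have htv : pvAt arr t < pvAt arr i := pvPop_head arr _ st t r hpp
      have hpw : (t :: r).Pairwise (fun a b => a < b) := by
        rw [← hpp]; exact pvPop_pairwise arr _ st _ hinv.1
      have hmin : ∀ k, i + 1 ≤ k → k < t → ¬ pvAt arr k < pvAt arr i := by
        intro k h1 h2 hv
        obtain ⟨m, hm, hmk⟩ := popN_bound arr i st hinv k (by omega) (by omega) hv
        rw [hpp] at hm
        rcases List.mem_cons.1 hm with hm' | hm'
        · omega
        · have : t < m := (List.pairwise_cons.1 hpw).1 m hm'
          omega
      have hscan : pvNextScan arr (pvAt arr i) arr.length (i + 1) = (t : Int) :=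
        pvNextScan_found arr _ arr.length (i + 1) t hti htn htv hmin
      refine ⟨i :: t :: r, ?_, ?_⟩
      · simp only [Prod.mk.injEq]
        constructor
        · rw [map_range_set arr.length i _ _ hin]
          refine List.map_congr_left (fun k hk => ?_)
          by_cases hkei : k = i
          · rw [hkei]
            rw [if_pos rfl, if_pos le_rfl, hscan]
          · by_cases hki : i + 1 ≤ k
            · rw [if_neg hkei, if_pos (by omega), if_pos (by omega)]
            · rw [if_neg hkei, if_neg (by omega), if_neg (by omega)]
        · trivial
      · refine ⟨?_, ?_, ?_, ?_⟩
        · refine List.pairwise_cons.2 ⟨fun m hm => ?_, hpw⟩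
          have : m ∈ st := pvPop_subset arr _ st m (by rw [hpp]; exact hm)
          have := (hinv.2.1 m this).1; omega
        · intro m hm
          rcases List.mem_cons.1 hm with hm' | hm'
          · omega
          · have : m ∈ st := pvPop_subset arr _ st m (by rw [hpp]; exact hm')
            have := hinv.2.1 m this; omega
        · intro m hm k h1 h2
          rcases List.mem_cons.1 hm with hm' | hm'
          · omega
          · have hmst : m ∈ st := pvPop_subset arr _ st m (by rw [hpp]; exact hm')
            by_cases hki : i + 1 ≤ k
            · exact hinv.2.2.1 m hmst k hki h2
            · have hkeq : k = i := by omega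
              subst hkeq
              rcases List.mem_cons.1 hm' with hmt | hmr
              · subst hmt; exact htv
              · have hmt : t < m := (List.pairwise_cons.1 hpw).1 m hmr
                exact lt_trans (hinv.2.2.1 m hmst t hti hmt) htv
        · intro m h1 h2 hprem
          rcases Nat.eq_or_lt_of_le h1 with h1' | h1'
          · simp [h1'.symm]
          · have hvm : pvAt arr m < pvAt arr i := hprem i le_rfl h1'
            have hmst : m ∈ st :=
              hinv.2.2.2 m h1' h2 (fun k hk1 hk2 => hprem k (by omega) hk2)
            have : m ∈ pvPop arr (pvAt arr i) st := mem_pvPop arr _ st m hmst hvm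
            rw [hpp] at this
            exact List.mem_cons_of_mem _ this

-- ===== VERDICT (by name: the statement is the Claim_ definition above) =====
theorem prev_next_min_element_spec : Claim_equal_prev_next_min_element := by
  intro arr _
  unfold Spec_prev_next_min_element prev_next_min_element prev_next_min_element_alt
  obtain ⟨stp, hp, _⟩ := prevFold arr arr.length le_rfl
  obtain ⟨stn, hn, _⟩ := nextFold arr arr.length 0 (by omega)
  have hr : List.range arr.length = List.range' 0 arr.length := List.range_eq_range' ..
  rw [hr, hn, ← hr, hp]
  have e1 : (List.range arr.length).map
      (fun k => if k < arr.length then pvPrevScan arr (pvAt arr k) k else (-1 : Int)) =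
      (List.range arr.length).map (fun i => pvPrevScan arr (pvAt arr i) i) :=
    List.map_congr_left (fun k hk => by
      have hk' : k < arr.length := List.mem_range.1 hk
      simp [hk'])
  have e2 : (List.range arr.length).map
      (fun k => if 0 ≤ k then pvNextScan arr (pvAt arr k) arr.length (k + 1)
                else ((arr.length : Nat) : Int)) =
      (List.range arr.length).map (fun i => pvNextScan arr (pvAt arr i) arr.length (i + 1)) :=
    List.map_congr_left (fun k _ => by simp)
  rw [e1, e2]
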